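-- pv_equiv track=rewrite | github.com/0xthiagomartins/edital-summarizer | src/edital_summarizer/tools/rag_tools.py | _find_potential_tables
-- ===== SOURCE A (Python) =====
-- from typing import List, Dict, Any, Optional, Union, ClassVar
--
-- def _find_potential_tables(text: str) -> List[str]:
--     """Identifica possíveis tabelas no texto."""
--     lines = text.split("\n")
--     potential_tables = []
--     current_table = []
--     in_table = False
--     consecutive_pattern_lines = 0
--
--     for line in lines:
--         # Heurística simples: linhas com vários espaços ou tabulações
--         # são candidatas a linhas de tabela
--         if "  " in line or "\t" in line:
--             if not in_table:
--                 in_table = True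
--             current_table.append(line)
--             consecutive_pattern_lines += 1
--
--             # Se tivermos pelo menos 3 linhas com padrão tabular, é uma tabela candidata
--             if consecutive_pattern_lines >= 3:
--                 in_table = True
--         else:
--             if in_table:
--                 # Uma linha não tabular pode ainda ser parte da tabela
--                 # (como um título ou nota de rodapé)
--                 current_table.append(line)
--
--                 # Se tivermos mais de 2 linhas não tabulares consecutivas,
--                 # consideramos que a tabela terminou
--                 consecutive_pattern_lines = 0
--
--                 if not line.strip():  # Linha vazia
--                     in_table = False
--                     if len(current_table) >= 3:  # Tabelas têm pelo menos 3 linhas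
--                         potential_tables.append("\n".join(current_table))
--                     current_table = []
--
--     # Não esquecer a última tabela
--     if current_table and len(current_table) >= 3:
--         potential_tables.append("\n".join(current_table))
--
--     return potential_tables
-- ===== SOURCE B (Python) =====
-- def _find_potential_tables(text: str):
--     """Identifica possíveis tabelas no texto."""
--     lines = text.split("\n")
--     n = len(lines)
--     result = []
--     i = 0
--     while i < n:
--         # skip lines until the first tabular-looking line
--         while i < n and not ("  " in lines[i] or "\t" in lines[i]):
--             i += 1
--         if i >= n:
--             break
--         # collect a block: every line until (and including) a blank
--         # non-tabular line, which terminates the table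
--         block = []
--         while i < n:
--             line = lines[i]
--             block.append(line)
--             i += 1
--             if not ("  " in line or "\t" in line) and not line.strip():
--                 break
--         if len(block) >= 3:
--             result.append("\n".join(block))
--     return result
-- ===== Notes on version B (the rewrite author's own statement) =====
-- stated objective: simpler
-- what changed: Replaces A's four-variable state machine (in_table flag plus a vestigial consecutive-pattern counter) with a two-phase index scan: an outer loop skipping to the next tabular line and an inner loop collecting until the terminating blank non-tabular line.
import Mathlib
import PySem

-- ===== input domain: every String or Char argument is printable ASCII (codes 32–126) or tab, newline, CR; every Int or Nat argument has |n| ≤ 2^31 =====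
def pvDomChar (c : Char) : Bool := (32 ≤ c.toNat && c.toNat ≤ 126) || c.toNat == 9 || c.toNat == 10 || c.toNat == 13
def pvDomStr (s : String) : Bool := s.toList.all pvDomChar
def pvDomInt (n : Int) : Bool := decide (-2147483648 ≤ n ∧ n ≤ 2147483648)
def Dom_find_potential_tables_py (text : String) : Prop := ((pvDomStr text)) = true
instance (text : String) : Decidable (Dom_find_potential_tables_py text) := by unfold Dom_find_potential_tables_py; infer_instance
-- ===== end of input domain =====

-- B replaces A's state machine (in_table flag + vestigial counter) with an
-- index scan: skip to the next tabular line, then collect until the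
-- terminating blank non-tabular line. Objective: simpler.

-- '"  " in line or "\t" in line'
def pvTab (line : String) : Bool :=
  PySem.Str.isIn "  " line || PySem.Str.isIn "\t" line

-- 'not line.strip()'
def pvBlank (line : String) : Bool :=
  PySem.Str.strip line == ""

-- ===== PORT A =====
-- the body of A's for-loop, on state (potential_tables, current_table, in_table, consecutive_pattern_lines)
def pvStepA (st : List String × List String × Bool × Int) (line : String) :
    List String × List String × Bool × Int :=
  let (pt, cur, inT, cnt) := st
  if pvTab line then
    let inT' := if !inT then true else inT
    let cur' := cur ++ [line]
    let cnt' := cnt + 1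
    if 3 ≤ cnt' then (pt, cur', true, cnt') else (pt, cur', inT', cnt')
  else
    if inT then
      let cur' := cur ++ [line]
      if pvBlank line then
        ((if !cur'.isEmpty && decide (3 ≤ cur'.length) then pt ++ [PySem.Str.join "\n" cur'] else pt),
         [], false, 0)
      else (pt, cur', inT, 0)
    else (pt, cur, inT, cnt)

-- A's trailing 'if current_table and len(current_table) >= 3'
def pvFinishA (st : List String × List String × Bool × Int) : List String :=
  let (pt, cur, _, _) := st
  if !cur.isEmpty && decide (3 ≤ cur.length) then pt ++ [PySem.Str.join "\n" cur] else pt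

def find_potential_tables_py (text : String) : List String :=
  let lines := (PySem.Str.split? text "\n").getD []
  pvFinishA (lines.foldl pvStepA ([], [], false, 0))

-- ===== PORT B =====
-- B's inner while-loop: append each line to the block, stop right after a
-- blank non-tabular line; returns (block, remaining lines)
def pvCollect : List String → List String → List String × List String
  | [], block => (block, [])
  | l :: ls, block =>
    let block' := block ++ [l]
    if !pvTab l && pvBlank l then (block', ls) else pvCollect ls block'

theorem pvCollect_snd_le (ls : List String) : ∀ b, (pvCollect ls b).2.length ≤ ls.length := by
  induction ls with
  | nil => intro b; simp [pvCollect]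
  | cons l ls ih =>
    intro b
    simp only [pvCollect]
    split
    · simp
    · exact Nat.le_trans (ih _) (Nat.le_succ _)

-- B's outer while-loop over the line index
def pvGoB : List String → List String
  | [] => []
  | l :: ls =>
    if _h : pvTab l = true then
      let p := pvCollect (l :: ls) []
      (if 3 ≤ p.1.length then [PySem.Str.join "\n" p.1] else []) ++ pvGoB p.2
    else pvGoB ls
termination_by ls => ls.length
decreasing_by
  · have : pvCollect (l :: ls) [] = pvCollect ls [l] := by
      simp [pvCollect, _h]
    simp only [this]
    exact Nat.lt_succ_of_le (pvCollect_snd_le ls [l])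
  · simp

def find_potential_tables_py_alt (text : String) : List String :=
  pvGoB ((PySem.Str.split? text "\n").getD [])

-- ===== PRECONDITION & SPEC =====
def Spec_find_potential_tables_py (text : String) (out : List String) : Prop := out = find_potential_tables_py_alt text
instance (text : String) (out : List String) : Decidable (Spec_find_potential_tables_py text out) := by unfold Spec_find_potential_tables_py; infer_instance

-- ===== CLAIM (what is proved, stated in full; the proofs are below) =====
def Claim_equal_find_potential_tables_py : Prop := ∀ (text : String), Dom_find_potential_tables_py text → Spec_find_potential_tables_py text (find_potential_tables_py text)

-- ===== LEMMAS AND PROOFS =====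

-- the heart: A's fold, started out of a table resp. inside a table, computes B's result
theorem pvMain (ls : List String) :
    (∀ acc cnt, pvFinishA (ls.foldl pvStepA (acc, [], false, cnt)) = acc ++ pvGoB ls) ∧
    (∀ acc cur cnt, cur ≠ [] →
      pvFinishA (ls.foldl pvStepA (acc, cur, true, cnt)) =
        acc ++ ((if 3 ≤ (pvCollect ls cur).1.length
                  then [PySem.Str.join "\n" (pvCollect ls cur).1] else [])
                ++ pvGoB (pvCollect ls cur).2)) := by
  induction ls with
  | nil =>
    constructor
    · intro acc cnt; simp [pvFinishA, pvGoB]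
    · intro acc cur cnt hc
      simp [pvFinishA, pvCollect, pvGoB, hc]
      split <;> simp
  | cons l ls ih =>
    constructor
    · intro acc cnt
      by_cases h : pvTab l = true
      · have hstep : pvStepA (acc, [], false, cnt) l = (acc, [l], true, cnt + 1) := by
          simp [pvStepA, h]
        have hcol : pvCollect (l :: ls) [] = pvCollect ls [l] := by
          simp [pvCollect, h]
        rw [List.foldl_cons, hstep]
        rw [ih.2 acc [l] (cnt + 1) (by simp)]
        rw [pvGoB, dif_pos h]
        simp only [hcol]
      · have hstep : pvStepA (acc, [], false, cnt) l = (acc, [], false, cnt) := by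
          simp [pvStepA, h]
        rw [List.foldl_cons, hstep, ih.1 acc cnt, pvGoB, dif_neg h]
    · intro acc cur cnt hc
      by_cases h : pvTab l = true
      · have hstep : pvStepA (acc, cur, true, cnt) l = (acc, cur ++ [l], true, cnt + 1) := by
          simp [pvStepA, h]
        rw [List.foldl_cons, hstep, ih.2 acc (cur ++ [l]) (cnt + 1) (by simp)]
        simp [pvCollect, h]
      · by_cases hb : pvBlank l = true
        · have hstep : pvStepA (acc, cur, true, cnt) l =
              ((if 3 ≤ (cur ++ [l]).length then acc ++ [PySem.Str.join "\n" (cur ++ [l])] else acc),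
               [], false, 0) := by
            simp [pvStepA, h, hb]
          have hcol : pvCollect (l :: ls) cur = (cur ++ [l], ls) := by
            simp [pvCollect, h, hb]
          rw [List.foldl_cons, hstep, ih.1 _ 0, hcol]
          split_ifs <;> simp
        · have hstep : pvStepA (acc, cur, true, cnt) l = (acc, cur ++ [l], true, 0) := by
            simp [pvStepA, h, hb]
          rw [List.foldl_cons, hstep, ih.2 acc (cur ++ [l]) 0 (by simp)]
          simp [pvCollect, h, hb]

-- ===== VERDICT (by name: the statement is the Claim_ definition above) =====
theorem find_potential_tables_py_spec : Claim_equal_find_potential_tables_py := by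
  intro text _
  unfold Spec_find_potential_tables_py find_potential_tables_py find_potential_tables_py_alt
  rw [(pvMain ((PySem.Str.split? text "\n").getD [])).1 [] 0]
  simp
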